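-- pv_equiv track=rewrite | github.com/PharenIT/Python-Toon-Schema | src/decoder.py | _parse_token
-- ===== SOURCE A (Python) =====
-- def _unescape_string(text: str) -> str:
--     result = []
--     i = 0
--     while i < len(text):
--         ch = text[i]
--         if ch != "\\":
--             result.append(ch)
--             i += 1
--             continue
--         i += 1
--         if i >= len(text):
--             break
--         esc = text[i]
--         if esc == "n":
--             result.append("\n")
--         elif esc == "r":
--             result.append("\r")
--         elif esc == "t":
--             result.append("\t")
--         else:
--             result.append(esc)
--         i += 1
--     return "".join(result)
--
-- def _skip_ws(text: str, idx: int) -> int: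
--     while idx < len(text) and text[idx].isspace():
--         idx += 1
--     return idx
--
-- def _parse_quoted(text: str, idx: int) -> tuple[str, int]:
--     idx += 1
--     start = idx
--     buf = []
--     while idx < len(text):
--         ch = text[idx]
--         if ch == "\\" and idx + 1 < len(text):
--             buf.append(text[idx])
--             buf.append(text[idx + 1])
--             idx += 2
--             continue
--         if ch == "\"":
--             raw = "".join(buf) if buf else text[start:idx]
--             return _unescape_string(raw), idx + 1
--         buf.append(ch)
--         idx += 1
--     return _unescape_string(text[start:idx]), idx
--
-- def _parse_token(text: str, idx: int, stop_chars: set[str]) -> tuple[str, int]: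
--     idx = _skip_ws(text, idx)
--     if idx >= len(text):
--         return "", idx
--     if text[idx] == "\"":
--         value, idx = _parse_quoted(text, idx)
--         return value, idx
--     start = idx
--     while idx < len(text):
--         ch = text[idx]
--         if ch.isspace() or ch in stop_chars:
--             break
--         idx += 1
--     return text[start:idx], idx
-- ===== SOURCE B (Python) =====
-- def _skip_ws(text, idx):
--     n = len(text)
--     return next((j for j in range(idx, n) if not text[j].isspace()), max(idx, n))
--
--
-- def _decode_escape(ch):
--     return {"n": "\n", "r": "\r", "t": "\t"}.get(ch, ch)
--
--
-- def _parse_quoted(text, idx):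
--     # one pass: decode escapes inline instead of collect-then-unescape
--     n = len(text)
--     i = idx + 1
--     out = []
--     while i < n:
--         ch = text[i]
--         if ch == "\\":
--             if i + 1 < n:
--                 out.append(_decode_escape(text[i + 1]))
--                 i += 2
--             else:
--                 i += 1  # lone trailing backslash is dropped
--         elif ch == "\"":
--             return "".join(out), i + 1
--         else:
--             out.append(ch)
--             i += 1
--     return "".join(out), i
--
--
-- def _parse_token(text, idx, stop_chars):
--     n = len(text)
--     idx = _skip_ws(text, idx)
--     if idx >= n:
--         return "", idx
--     if text[idx] == "\"":
--         return _parse_quoted(text, idx)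
--     end = next((j for j in range(idx, n)
--                 if text[j].isspace() or text[j] in stop_chars), n)
--     return text[idx:end], end
-- ===== Notes on version B (the rewrite author's own statement) =====
-- stated objective: simpler
-- what changed: The quoted case decodes escapes inline in a single scan (dropping the separate raw-collect buffer and the whole _unescape_string second pass), and whitespace skipping and the unquoted-token end are found with next() over a generator instead of index-mutating while loops.
-- outside the precondition, e.g. on _parse_token('"a\\', -3, set()): A returns ('a', 3), B returns ('a"a', 3)
import Mathlib
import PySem

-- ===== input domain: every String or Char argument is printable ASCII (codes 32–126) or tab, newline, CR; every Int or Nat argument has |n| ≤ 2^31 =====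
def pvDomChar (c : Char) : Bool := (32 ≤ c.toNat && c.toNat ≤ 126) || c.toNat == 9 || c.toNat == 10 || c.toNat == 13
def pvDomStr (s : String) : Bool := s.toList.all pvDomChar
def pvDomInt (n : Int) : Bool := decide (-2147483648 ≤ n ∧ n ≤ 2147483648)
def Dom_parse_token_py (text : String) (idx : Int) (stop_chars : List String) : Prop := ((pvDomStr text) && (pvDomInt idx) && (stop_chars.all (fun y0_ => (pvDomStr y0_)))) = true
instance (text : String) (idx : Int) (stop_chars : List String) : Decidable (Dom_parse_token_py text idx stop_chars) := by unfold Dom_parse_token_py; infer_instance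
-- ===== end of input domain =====

-- B replaces A's collect-raw-then-_unescape_string quoted parse by a single scan decoding
-- each escape inline, and replaces the index-mutating while loops of _skip_ws and of the
-- unquoted token by next() over a generator (a find over a range); objective: simpler.
-- (All while loops are ported as structural recursion on a fuel counter that only makes
-- them total; the fuel is always large enough for the loop to finish on its own test.)

-- ===== PORT A =====

-- _unescape_string: the while loop with i += 1 / i += 2 over text becomes the obvious
-- structural recursion on the character list (same branch order, same appends).
def pvUnescA : List Char → List Char
  | [] => []
  | c :: rest =>
    if c ≠ '\\' then c :: pvUnescA rest
    else match rest with
      | [] => []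
      | e :: rest' =>
        (if e = 'n' then '\n'
         else if e = 'r' then '\r'
         else if e = 't' then '\t'
         else e) :: pvUnescA rest'

-- _skip_ws: while idx < len(text) and text[idx].isspace(): idx += 1
def pvSkipWsAGo (cs : List Char) : Nat → Int → Int
  | 0, idx => idx
  | n + 1, idx =>
    if idx < (cs.length : Int) ∧ PySem.Chars.isspace (PySem.List.pyGetD cs idx ' ') then
      pvSkipWsAGo cs n (idx + 1)
    else idx

def pvSkipWsA (cs : List Char) (idx : Int) : Int :=
  pvSkipWsAGo cs ((cs.length : Int) - idx).toNat idx

-- the while loop of _parse_quoted (state: idx, buf); start is the saved slice start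
def pvQuotedLoopA (cs : List Char) (start : Int) : Nat → Int → List Char → String × Int
  | 0, idx, _buf =>
    (String.ofList (pvUnescA (PySem.List.slice cs (some start) (some idx))), idx)
  | n + 1, idx, buf =>
    if idx < (cs.length : Int) then
      let ch := PySem.List.pyGetD cs idx ' '
      if ch = '\\' ∧ idx + 1 < (cs.length : Int) then
        pvQuotedLoopA cs start n (idx + 2) (buf ++ [ch, PySem.List.pyGetD cs (idx + 1) ' '])
      else if ch = '"' then
        let raw := if buf = [] then PySem.List.slice cs (some start) (some idx) else buf
        (String.ofList (pvUnescA raw), idx + 1)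
      else
        pvQuotedLoopA cs start n (idx + 1) (buf ++ [ch])
    else
      (String.ofList (pvUnescA (PySem.List.slice cs (some start) (some idx))), idx)

def pvParseQuotedA (cs : List Char) (idx : Int) : String × Int :=
  pvQuotedLoopA cs (idx + 1) ((cs.length : Int) - (idx + 1)).toNat (idx + 1) []

-- the unquoted while loop of _parse_token: advance until whitespace or a stop char
def pvTokenLoopA (cs : List Char) (stop_chars : List String) : Nat → Int → Int
  | 0, idx => idx
  | n + 1, idx =>
    if idx < (cs.length : Int) then
      let ch := PySem.List.pyGetD cs idx ' '
      if PySem.Chars.isspace ch || stop_chars.contains (String.ofList [ch]) then idx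
      else pvTokenLoopA cs stop_chars n (idx + 1)
    else idx

def parse_token_py (text : String) (idx : Int) (stop_chars : List String) : String × Int :=
  let cs := text.toList
  let i := pvSkipWsA cs idx
  if (cs.length : Int) ≤ i then ("", i)
  else if PySem.List.pyGetD cs i ' ' = '"' then pvParseQuotedA cs i
  else
    let j := pvTokenLoopA cs stop_chars ((cs.length : Int) - i).toNat i
    (String.ofList (PySem.List.slice cs (some i) (some j)), j)

-- ===== PORT B =====

-- {"n": "\n", "r": "\r", "t": "\t"}.get(ch, ch)
def pvDecodeEscB (c : Char) : Char :=
  PySem.Dict.getD ⟨[('n', '\n'), ('r', '\r'), ('t', '\t')]⟩ c c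

-- next((j for j in range(idx, n) if not text[j].isspace()), max(idx, n))
def pvSkipWsB (cs : List Char) (idx : Int) : Int :=
  ((PySem.List.pyRange idx (cs.length : Int) 1).find?
      (fun j => !PySem.Chars.isspace (PySem.List.pyGetD cs j ' '))).getD
    (max idx (cs.length : Int))

-- B's _parse_quoted loop: decode escapes inline while scanning
def pvQuotedLoopB (cs : List Char) : Nat → Int → List Char → String × Int
  | 0, idx, out => (String.ofList out, idx)
  | n + 1, idx, out =>
    if idx < (cs.length : Int) then
      let ch := PySem.List.pyGetD cs idx ' '
      if ch = '\\' then
        if idx + 1 < (cs.length : Int) then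
          pvQuotedLoopB cs n (idx + 2) (out ++ [pvDecodeEscB (PySem.List.pyGetD cs (idx + 1) ' ')])
        else
          pvQuotedLoopB cs n (idx + 1) out  -- lone trailing backslash is dropped
      else if ch = '"' then (String.ofList out, idx + 1)
      else pvQuotedLoopB cs n (idx + 1) (out ++ [ch])
    else (String.ofList out, idx)

def parse_token_py_alt (text : String) (idx : Int) (stop_chars : List String) : String × Int :=
  let cs := text.toList
  let i := pvSkipWsB cs idx
  if (cs.length : Int) ≤ i then ("", i)
  else if PySem.List.pyGetD cs i ' ' = '"' then
    pvQuotedLoopB cs ((cs.length : Int) - (i + 1)).toNat (i + 1) []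
  else
    let e := ((PySem.List.pyRange i (cs.length : Int) 1).find?
        (fun j => PySem.Chars.isspace (PySem.List.pyGetD cs j ' ')
          || stop_chars.contains (String.ofList [PySem.List.pyGetD cs j ' ']))).getD (cs.length : Int)
    (String.ofList (PySem.List.slice cs (some i) (some e)), e)

-- ===== PRECONDITION & SPEC =====
-- Pre_ excludes negative idx, where A either raises IndexError (idx < -len(text)) or, through
-- Python's negative-index wraparound, mixes wrapped-position scanning with a raw slice on an
-- unterminated quote — an accidental corner no caller of a tokenizer relies on.
def Pre_parse_token_py (text : String) (idx : Int) (stop_chars : List String) : Prop := 0 ≤ idx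
instance (text : String) (idx : Int) (stop_chars : List String) : Decidable (Pre_parse_token_py text idx stop_chars) := by unfold Pre_parse_token_py; infer_instance

def pvWitness_parse_token_py : String × Int × List String := (" \"a\\nb\"", 0, [","])

def Spec_parse_token_py (text : String) (idx : Int) (stop_chars : List String) (out : String × Int) : Prop := out = parse_token_py_alt text idx stop_chars
instance (text : String) (idx : Int) (stop_chars : List String) (out : String × Int) : Decidable (Spec_parse_token_py text idx stop_chars out) := by unfold Spec_parse_token_py; infer_instance

-- ===== CLAIM (what is proved, stated in full; the proofs are below) =====
def Claim_equal_parse_token_py : Prop := ∀ (text : String) (idx : Int) (stop_chars : List String), Dom_parse_token_py text idx stop_chars → Pre_parse_token_py text idx stop_chars → Spec_parse_token_py text idx stop_chars (parse_token_py text idx stop_chars)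

-- ===== LEMMAS AND PROOFS =====

-- a collected chunk list is "escape-complete": it does not end inside an escape
def pvEscOK : List Char → Bool
  | [] => true
  | c :: rest =>
    if c = '\\' then
      match rest with
      | [] => false
      | _ :: rest' => pvEscOK rest'
    else pvEscOK rest

theorem pvUnescA_cons_ne (c : Char) (xs : List Char) (hc : c ≠ '\\') :
    pvUnescA (c :: xs) = c :: pvUnescA xs := by
  cases xs <;> simp [pvUnescA, hc]

theorem pvEscOK_cons_ne (c : Char) (xs : List Char) (hc : c ≠ '\\') :
    pvEscOK (c :: xs) = pvEscOK xs := by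
  cases xs <;> simp [pvEscOK, hc]

theorem pvEscOK_append (b s : List Char) (hb : pvEscOK b = true) :
    pvEscOK (b ++ s) = pvEscOK s := by
  induction b using pvUnescA.induct with
  | case1 => simp
  | case2 c rest hc ih =>
    rw [pvEscOK_cons_ne _ _ hc] at hb
    rw [List.cons_append, pvEscOK_cons_ne _ _ hc]
    exact ih hb
  | case3 c hpr =>
    rw [not_not] at hpr; subst hpr; simp [pvEscOK] at hb
  | case4 c hpr e rest ih =>
    rw [not_not] at hpr; subst hpr
    simp only [pvEscOK] at hb
    simp only [List.cons_append, pvEscOK]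
    simpa using ih (by simpa using hb)

theorem pvUnescA_append (b s : List Char) (hb : pvEscOK b = true) :
    pvUnescA (b ++ s) = pvUnescA b ++ pvUnescA s := by
  induction b using pvUnescA.induct with
  | case1 => simp [pvUnescA]
  | case2 c rest hc ih =>
    rw [pvEscOK_cons_ne _ _ hc] at hb
    rw [List.cons_append, pvUnescA_cons_ne _ _ hc, pvUnescA_cons_ne _ _ hc, ih hb,
      List.cons_append]
  | case3 c hpr =>
    rw [not_not] at hpr; subst hpr; simp [pvEscOK] at hb
  | case4 c hpr e rest ih =>
    rw [not_not] at hpr; subst hpr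
    simp only [pvEscOK] at hb
    simp only [List.cons_append, pvUnescA]
    simp [ih (by simpa using hb)]

theorem pvDecodeEscB_eq (c : Char) :
    pvDecodeEscB c =
      (if c = 'n' then '\n' else if c = 'r' then '\r' else if c = 't' then '\t' else c) := by
  by_cases h1 : c = 'n'
  · subst h1; decide
  · by_cases h2 : c = 'r'
    · subst h2; decide
    · by_cases h3 : c = 't'
      · subst h3; decide
      · have e1 : ('n' == c) = false := beq_eq_false_iff_ne.mpr (Ne.symm h1)
        have e2 : ('r' == c) = false := beq_eq_false_iff_ne.mpr (Ne.symm h2)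
        have e3 : ('t' == c) = false := beq_eq_false_iff_ne.mpr (Ne.symm h3)
        simp [pvDecodeEscB, PySem.Dict.getD, PySem.Dict.get?, List.find?, e1, e2, e3, h1, h2, h3]

theorem pv_slice_self (cs : List Char) (a : Int) (h : 0 ≤ a) :
    PySem.List.slice cs (some a) (some a) = [] := by
  rw [PySem.List.slice_toNat cs h h]; simp

theorem pv_slice_snoc (cs : List Char) (a i : Int) (h0 : 0 ≤ a) (h1 : a ≤ i)
    (h2 : i < (cs.length : Int)) :
    PySem.List.slice cs (some a) (some (i + 1)) =
      PySem.List.slice cs (some a) (some i) ++ [PySem.List.pyGetD cs i ' '] := by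
  rw [PySem.List.slice_toNat cs h0 (by omega), PySem.List.slice_toNat cs h0 (by omega),
    PySem.List.pyGetD_eq_getElem cs ' ' (by omega) h2]
  have hk : (i + 1).toNat - a.toNat = (i.toNat - a.toNat) + 1 := by omega
  rw [hk, List.take_add_one]
  congr 1
  rw [List.getElem?_drop]
  have : a.toNat + (i.toNat - a.toNat) = i.toNat := by omega
  rw [this]
  rw [List.getElem?_eq_getElem (by omega)]
  simp

theorem pv_skipws_go_ge (cs : List Char) (n : Nat) :
    ∀ idx : Int, idx ≤ pvSkipWsAGo cs n idx := by
  induction n with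
  | zero => intro idx; simp [pvSkipWsAGo]
  | succ n ih =>
    intro idx
    rw [pvSkipWsAGo]
    by_cases h : idx < (cs.length : Int) ∧ PySem.Chars.isspace (PySem.List.pyGetD cs idx ' ')
    · rw [if_pos h]; have := ih (idx + 1); omega
    · rw [if_neg h]

theorem pv_skipws_ge (cs : List Char) (idx : Int) : idx ≤ pvSkipWsA cs idx :=
  pv_skipws_go_ge cs _ idx

theorem pv_skipws_go_eq (cs : List Char) (n : Nat) :
    ∀ idx : Int, ((cs.length : Int) - idx).toNat ≤ n → pvSkipWsAGo cs n idx = pvSkipWsB cs idx := by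
  induction n with
  | zero =>
    intro idx hn
    rw [pvSkipWsAGo, pvSkipWsB, PySem.List.pyRange_one_eq_nil (by omega)]
    simp; omega
  | succ n ih =>
    intro idx hn
    rw [pvSkipWsAGo]
    by_cases hlt : idx < (cs.length : Int)
    · rw [pvSkipWsB, PySem.List.pyRange_one_cons hlt, List.find?_cons]
      by_cases hsp : PySem.Chars.isspace (PySem.List.pyGetD cs idx ' ')
      · rw [if_pos ⟨hlt, hsp⟩, ih (idx + 1) (by omega), pvSkipWsB]
        simp only [hsp, Bool.not_true]
        cases hf : (PySem.List.pyRange (idx + 1) (cs.length : Int)).find?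
            (fun j => !PySem.Chars.isspace (PySem.List.pyGetD cs j ' ')) with
        | none => simp; omega
        | some v => simp
      · rw [if_neg (by tauto)]
        simp [hsp]
    · rw [if_neg (by tauto), pvSkipWsB, PySem.List.pyRange_one_eq_nil (by omega)]
      simp; omega

theorem pv_skipws_eq (cs : List Char) (idx : Int) : pvSkipWsA cs idx = pvSkipWsB cs idx :=
  pv_skipws_go_eq cs _ idx (le_refl _)

theorem pv_token_end_eq (cs : List Char) (stop_chars : List String) (n : Nat) :
    ∀ idx : Int, idx ≤ (cs.length : Int) → ((cs.length : Int) - idx).toNat ≤ n →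
    pvTokenLoopA cs stop_chars n idx =
      ((PySem.List.pyRange idx (cs.length : Int) 1).find?
        (fun j => PySem.Chars.isspace (PySem.List.pyGetD cs j ' ')
          || stop_chars.contains (String.ofList [PySem.List.pyGetD cs j ' ']))).getD
        (cs.length : Int) := by
  induction n with
  | zero =>
    intro idx hle hn
    rw [pvTokenLoopA, PySem.List.pyRange_one_eq_nil (by omega)]
    simp; omega
  | succ n ih =>
    intro idx hle hn
    rw [pvTokenLoopA]
    by_cases hlt : idx < (cs.length : Int)
    · rw [if_pos hlt, PySem.List.pyRange_one_cons hlt, List.find?_cons]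
      have htail := ih (idx + 1) (by omega) (by omega)
      cases hb : (PySem.Chars.isspace (PySem.List.pyGetD cs idx ' ')
          || stop_chars.contains (String.ofList [PySem.List.pyGetD cs idx ' '])) with
      | true =>
        have hb' : PySem.Chars.isspace (PySem.List.pyGetD cs idx ' ') = true ∨
            String.ofList [PySem.List.pyGetD cs idx ' '] ∈ stop_chars := by simpa using hb
        rcases hb' with h | h <;> simp [h]
      | false =>
        have hb' : PySem.Chars.isspace (PySem.List.pyGetD cs idx ' ') = false ∧
            String.ofList [PySem.List.pyGetD cs idx ' '] ∉ stop_chars := by simpa using hb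
        rw [if_neg (by simp [hb'.1, hb'.2]), htail]
    · rw [if_neg hlt, PySem.List.pyRange_one_eq_nil (by omega)]
      simp; omega

theorem pv_quoted_eq (cs : List Char) (start : Int) (h0 : 0 ≤ start) (n : Nat) :
    ∀ (idx : Int) (buf : List Char),
      start ≤ idx → buf = PySem.List.slice cs (some start) (some idx) → pvEscOK buf = true →
      pvQuotedLoopA cs start n idx buf = pvQuotedLoopB cs n idx (pvUnescA buf) := by
  induction n with
  | zero =>
    intro idx buf _h1 hbuf _hok
    rw [pvQuotedLoopA, pvQuotedLoopB, hbuf]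
  | succ n ih =>
    intro idx buf h1 hbuf hok
    rw [pvQuotedLoopA, pvQuotedLoopB]
    by_cases hlt : idx < (cs.length : Int)
    · rw [if_pos hlt, if_pos hlt]
      set ch := PySem.List.pyGetD cs idx ' ' with hch
      by_cases hbs : ch = '\\'
      · by_cases hnx : idx + 1 < (cs.length : Int)
        · rw [if_pos ⟨hbs, hnx⟩, if_pos hbs, if_pos hnx]
          set c2 := PySem.List.pyGetD cs (idx + 1) ' ' with hc2
          have hsl : buf ++ [ch, c2] = PySem.List.slice cs (some start) (some (idx + 2)) := by
            have e1 := pv_slice_snoc cs start idx h0 h1 hlt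
            have e2 := pv_slice_snoc cs start (idx + 1) h0 (by omega) hnx
            have e3 : (idx + 1) + 1 = idx + 2 := by omega
            rw [e3] at e2
            rw [e2, e1, ← hbuf, ← hch, ← hc2]
            simp
          have hok2 : pvEscOK (buf ++ [ch, c2]) = true := by
            rw [pvEscOK_append _ _ hok, hbs]; rfl
          have hun : pvUnescA (buf ++ [ch, c2]) = pvUnescA buf ++ [pvDecodeEscB c2] := by
            rw [pvUnescA_append _ _ hok, hbs, pvDecodeEscB_eq]
            simp [pvUnescA]
          rw [← hun]
          exact ih (idx + 2) (buf ++ [ch, c2]) (by omega) hsl hok2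
        · rw [if_neg (by tauto), if_pos hbs, if_neg hnx,
            if_neg (by rw [hbs]; decide)]
          have hsl : PySem.List.slice cs (some start) (some (idx + 1)) = buf ++ [ch] := by
            rw [pv_slice_snoc cs start idx h0 h1 hlt, ← hbuf, ← hch]
          have hv : pvUnescA (buf ++ [ch]) = pvUnescA buf := by
            rw [pvUnescA_append _ _ hok, hbs]
            simp [pvUnescA]
          cases n with
          | zero =>
            rw [pvQuotedLoopA, pvQuotedLoopB, hsl, hv]
          | succ m =>
            rw [pvQuotedLoopA, pvQuotedLoopB, if_neg (by omega), if_neg (by omega), hsl, hv]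
      · rw [if_neg (by tauto), if_neg hbs]
        by_cases hq : ch = '"'
        · rw [if_pos hq, if_pos hq]
          have hraw : (if buf = [] then PySem.List.slice cs (some start) (some idx) else buf)
              = buf := by
            by_cases hb : buf = []
            · rw [if_pos hb, ← hbuf, hb]
            · rw [if_neg hb]
          rw [hraw]
        · rw [if_neg hq, if_neg hq]
          have hsl : buf ++ [ch] = PySem.List.slice cs (some start) (some (idx + 1)) := by
            rw [pv_slice_snoc cs start idx h0 h1 hlt, ← hbuf, ← hch]
          have hok2 : pvEscOK (buf ++ [ch]) = true := by
            rw [pvEscOK_append _ _ hok, pvEscOK_cons_ne _ _ hbs]; rfl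
          have hun : pvUnescA (buf ++ [ch]) = pvUnescA buf ++ [ch] := by
            rw [pvUnescA_append _ _ hok, pvUnescA_cons_ne _ _ hbs]; rfl
          rw [← hun]
          exact ih (idx + 1) (buf ++ [ch]) (by omega) hsl hok2
    · rw [if_neg hlt, if_neg hlt, hbuf]

-- ===== VERDICT (by name: the statement is the Claim_ definition above) =====
theorem parse_token_py_spec : Claim_equal_parse_token_py := by
  intro text idx stop_chars _hdom hpre
  unfold Spec_parse_token_py parse_token_py parse_token_py_alt
  simp only [← pv_skipws_eq]
  set cs := text.toList with hcs
  set i := pvSkipWsA cs idx with hi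
  have h0i : 0 ≤ i := le_trans hpre (pv_skipws_ge cs idx)
  by_cases hend : (cs.length : Int) ≤ i
  · rw [if_pos hend, if_pos hend]
  · rw [if_neg hend, if_neg hend]
    by_cases hq : PySem.List.pyGetD cs i ' ' = '"'
    · rw [if_pos hq, if_pos hq]
      unfold pvParseQuotedA
      exact pv_quoted_eq cs (i + 1) (by omega) _ (i + 1) [] (le_refl _)
        (by rw [pv_slice_self cs (i + 1) (by omega)]) rfl
    · rw [if_neg hq, if_neg hq]
      rw [pv_token_end_eq cs stop_chars _ i (by omega) (le_refl _)]
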